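-- pv_equiv track=rewrite | github.com/aguestuser/doomscrollingforgodot | srctxt/parse.py | take_token
-- ===== SOURCE A (Python) =====
-- def take_token(input: str) -> (str, str):
--     """
--     Consumes first token from string input
--     Returns tuple of (token, remaining string)
--     """
--     token = ""
--     for (i, char) in enumerate(input):
--         if char.isspace() and token:
--             return (token, input[i+1:])
--         if char.isspace() and not token:
--             continue # skip leading whitespace
--         token += char
--     return (token, "") # if we have reached end of input
-- ===== SOURCE B (Python) =====
-- def take_token(input: str) -> (str, str):
--     """
--     Consumes first token from string input
--     Returns tuple of (token, remaining string)
--     """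
--     s = input.lstrip()
--     for j, ch in enumerate(s):
--         if ch.isspace():
--             return (s[:j], s[j + 1:])
--     return (s, "")
-- ===== Notes on version B (the rewrite author's own statement) =====
-- stated objective: simpler
-- what changed: Replaces the per-character token accumulation with its two-branch leading-whitespace state machine by lstrip followed by a scan for the first whitespace index and two slices.
import Mathlib
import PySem

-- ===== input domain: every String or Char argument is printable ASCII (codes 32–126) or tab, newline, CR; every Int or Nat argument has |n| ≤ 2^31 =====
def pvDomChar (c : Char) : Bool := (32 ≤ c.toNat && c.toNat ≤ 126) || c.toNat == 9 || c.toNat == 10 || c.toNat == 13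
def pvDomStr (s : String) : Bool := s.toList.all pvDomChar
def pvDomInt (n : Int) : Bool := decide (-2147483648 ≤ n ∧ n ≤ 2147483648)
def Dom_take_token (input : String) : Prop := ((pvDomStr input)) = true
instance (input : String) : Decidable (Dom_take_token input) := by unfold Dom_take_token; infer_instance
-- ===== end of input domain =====

-- B replaces A's per-character accumulation state machine by lstrip + first-whitespace scan + slices (simpler decomposition).

-- ===== PORT A =====
-- A's for-loop with early return, transliterated: index i, accumulator token, original string kept for input[i+1:].
def take_token_go (cs : List Char) (i : Nat) (token : List Char) (orig : List Char) :
    String × String :=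
  match cs with
  | [] => (String.ofList token, "")
  | c :: rest =>
    if PySem.Chars.isspace c && !token.isEmpty then
      (String.ofList token,
       String.ofList (PySem.List.slice orig (some ((i : Int) + 1)) none))
    else if PySem.Chars.isspace c && token.isEmpty then
      take_token_go rest (i + 1) token orig
    else
      take_token_go rest (i + 1) (token ++ [c]) orig

def take_token (input : String) : String × String :=
  take_token_go input.toList 0 [] input.toList

-- ===== PORT B =====
-- B's for-loop over enumerate(s) returning the first whitespace index, transliterated.
def take_token_findSpace (cs : List Char) (j : Nat) : Option Nat :=
  match cs with
  | [] => none
  | c :: rest => if PySem.Chars.isspace c then some j else take_token_findSpace rest (j + 1)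

def take_token_alt (input : String) : String × String :=
  let s := PySem.Chars.lstrip input.toList
  match take_token_findSpace s 0 with
  | some j =>
      (String.ofList (PySem.List.slice s none (some (j : Int))),
       String.ofList (PySem.List.slice s (some ((j : Int) + 1)) none))
  | none => (String.ofList s, "")

-- ===== PRECONDITION & SPEC =====
def Spec_take_token (input : String) (out : String × String) : Prop := out = take_token_alt input
instance (input : String) (out : String × String) : Decidable (Spec_take_token input out) := by unfold Spec_take_token; infer_instance

-- ===== CLAIM (what is proved, stated in full; the proofs are below) =====
def Claim_equal_take_token : Prop := ∀ (input : String), Dom_take_token input → Spec_take_token input (take_token input)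

-- ===== LEMMAS AND PROOFS =====

-- B's value, phrased on lists, as a function of the stripped string s.
def tt_b (s : List Char) : String × String :=
  match take_token_findSpace s 0 with
  | some j =>
      (String.ofList (s.take j), String.ofList (s.drop (j + 1)))
  | none => (String.ofList s, "")

theorem findSpace_shift (cs : List Char) (j : Nat) :
    take_token_findSpace cs j = (take_token_findSpace cs 0).map (fun k => k + j) := by
  induction cs generalizing j with
  | nil => simp [take_token_findSpace]
  | cons c rest ih =>
    by_cases h : PySem.Chars.isspace c
    · simp [take_token_findSpace, h]
    · rw [take_token_findSpace, take_token_findSpace, if_neg (by simp [h]),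
        if_neg (by simp [h]), ih (j + 1), ih 1, Option.map_map]
      congr 1; funext k; simp; omega

-- Once token is nonempty, A's loop returns (token ++ prefix before first space, suffix after it).
theorem goA_accum (s tok orig : List Char) (i : Nat) (hi : orig.drop i = s)
    (htok : tok ≠ []) :
    take_token_go s i tok orig =
      match take_token_findSpace s 0 with
      | some j => (String.ofList (tok ++ s.take j), String.ofList (s.drop (j + 1)))
      | none => (String.ofList (tok ++ s), "") := by
  induction s generalizing tok i with
  | nil => simp [take_token_go, take_token_findSpace]
  | cons c rest ih =>
    have hrest : orig.drop (i + 1) = rest := by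
      have := congrArg (List.drop 1) hi
      simpa [List.drop_drop, Nat.add_comm] using this
    by_cases h : PySem.Chars.isspace c
    · rw [take_token_go, if_pos (by simp [h, htok])]
      rw [show ((i : Int) + 1) = ((i + 1 : Nat) : Int) by push_cast; ring,
        PySem.List.slice_from_natCast, hrest]
      simp [take_token_findSpace, h]
    · rw [take_token_go, if_neg (by simp [h]), if_neg (by simp [h]),
        ih (tok ++ [c]) (i + 1) hrest (by simp)]
      rw [take_token_findSpace, if_neg (by simp [h]), findSpace_shift rest 1]
      cases hfs : take_token_findSpace rest 0 with
      | none => simp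
      | some k => simp [List.take_succ_cons]

-- A's leading-whitespace skip phase: with empty token, A runs on the lstripped suffix.
theorem goA_skip (s orig : List Char) (i : Nat) (hi : orig.drop i = s) :
    take_token_go s i [] orig =
      take_token_go (s.dropWhile PySem.Chars.isspace) (i + (s.length - (s.dropWhile PySem.Chars.isspace).length)) [] orig := by
  induction s generalizing i with
  | nil => simp
  | cons c rest ih =>
    have hrest : orig.drop (i + 1) = rest := by
      have := congrArg (List.drop 1) hi
      simpa [List.drop_drop, Nat.add_comm] using this
    by_cases h : PySem.Chars.isspace c
    · rw [take_token_go, if_neg (by simp [h]), if_pos (by simp [h]),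
        ih (i + 1) hrest, List.dropWhile_cons_of_pos h]
      congr 1
      have := List.length_dropWhile_le (p := PySem.Chars.isspace) rest
      simp; omega
    · rw [List.dropWhile_cons_of_neg h]
      congr 1
      omega

-- A's loop on a string with a non-space first character equals B's scan-and-slice value.
theorem goA_main (s orig : List Char) (i : Nat) (hi : orig.drop i = s)
    (hhd : s.dropWhile PySem.Chars.isspace = s) :
    take_token_go s i [] orig = tt_b s := by
  cases s with
  | nil => simp [take_token_go, tt_b, take_token_findSpace]
  | cons c rest =>
    have h : ¬ PySem.Chars.isspace c = true := by
      intro h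
      have h1 := congrArg List.length hhd
      rw [List.dropWhile_cons_of_pos h] at h1
      have h2 := List.length_dropWhile_le (p := PySem.Chars.isspace) rest
      simp only [List.length_cons] at h1
      omega
    have hrest : orig.drop (i + 1) = rest := by
      have := congrArg (List.drop 1) hi
      simpa [List.drop_drop, Nat.add_comm] using this
    rw [take_token_go, if_neg (by simp [h]), if_neg (by simp [h])]
    simp only [List.nil_append]
    rw [goA_accum rest [c] orig (i + 1) hrest (by simp)]
    rw [tt_b, take_token_findSpace, if_neg (by simp [h]), findSpace_shift rest 1]
    cases hfs : take_token_findSpace rest 0 with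
    | none => simp
    | some k => simp [List.take_succ_cons]

-- ===== VERDICT (by name: the statement is the Claim_ definition above) =====
theorem take_token_spec : Claim_equal_take_token := by
  intro input _
  show take_token input = take_token_alt input
  rw [take_token, take_token_alt]
  have hstrip : PySem.Chars.lstrip input.toList
      = input.toList.dropWhile PySem.Chars.isspace := by
    simp [PySem.Chars.lstrip]
  have hdw : (input.toList.dropWhile PySem.Chars.isspace).dropWhile PySem.Chars.isspace
      = input.toList.dropWhile PySem.Chars.isspace := by
    exact List.dropWhile_idempotent _ _
  rw [goA_skip input.toList input.toList 0 (by simp),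
    goA_main (input.toList.dropWhile PySem.Chars.isspace) input.toList _ ?_ hdw]
  · rw [tt_b, hstrip]
    cases hfs : take_token_findSpace (input.toList.dropWhile PySem.Chars.isspace) 0 with
    | none => simp
    | some j =>
      simp [PySem.List.slice_to_natCast]
      rw [show ((j : Int) + 1) = ((j + 1 : Nat) : Int) by push_cast; ring,
        PySem.List.slice_from_natCast]
  · simpa using (List.suffix_iff_eq_drop.mp (List.dropWhile_suffix PySem.Chars.isspace)).symm
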